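-- pv_equiv track=rewrite | github.com/neumond/minpiler | mind.py | remove_unnecessary_jumps
-- ===== SOURCE A (Python) =====
-- def remove_unnecessary_jumps(lines):
--     remove_lines = set()
--     for a_index, (a, b) in enumerate(zip(lines, lines[1:])):
--         if not (a.startswith('jump ') and b.startswith('label ')):
--             continue
--         _, jmp_label, _ = a.split(' ', 2)
--         _, target_label = b.split(' ', 1)
--         if jmp_label == target_label:
--             remove_lines.add(a_index)
--     return [line for i, line in enumerate(lines) if i not in remove_lines]
-- ===== SOURCE B (Python) =====
-- def remove_unnecessary_jumps(lines):
--     # Backward-looking peephole: push every line; when a label arrives, pop the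
--     # jump on top of the output if it targets this label.
--     out = []
--     for line in lines:
--         if line.startswith('label ') and out and out[-1].startswith('jump ') \
--                 and out[-1].split(' ', 2)[1] == line.split(' ', 1)[1]:
--             out.pop()
--         out.append(line)
--     return out
-- ===== Notes on version B (the rewrite author's own statement) =====
-- stated objective: alternative
-- what changed: A looks FORWARD from each jump (zip of adjacent pairs building a set of indices, then a filter pass); B is a backward-looking peephole pass over an output stack: every line is pushed, and when a 'label' line arrives the jump on top of the stack is popped if it targets that label.
import Mathlib
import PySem

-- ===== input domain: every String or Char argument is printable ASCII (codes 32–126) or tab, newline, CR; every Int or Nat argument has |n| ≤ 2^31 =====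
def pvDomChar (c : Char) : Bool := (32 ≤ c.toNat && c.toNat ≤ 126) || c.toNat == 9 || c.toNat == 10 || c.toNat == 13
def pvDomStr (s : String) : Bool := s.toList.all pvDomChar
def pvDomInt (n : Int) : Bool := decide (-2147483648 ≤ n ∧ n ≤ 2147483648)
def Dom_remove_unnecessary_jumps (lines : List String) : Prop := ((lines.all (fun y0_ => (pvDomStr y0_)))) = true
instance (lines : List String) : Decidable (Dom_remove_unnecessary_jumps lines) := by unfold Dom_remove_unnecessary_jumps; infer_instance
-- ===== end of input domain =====

-- B replaces A's forward pair-scan + index-set filter by a backward-looking peephole pass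
-- over an output stack (push each line; a label pops a matching jump); objective: alternative.

-- ===== PORT A =====
def remove_unnecessary_jumps (lines : List String) : List String :=
  let remove_lines : PySem.Set Int :=
    (PySem.List.enumerate (lines.zip (PySem.List.slice lines (some 1) none)) 0).foldl
      (fun s q =>
        if !(PySem.Str.startswith q.2.1 "jump " && PySem.Str.startswith q.2.2 "label ") then s
        else
          match PySem.Str.splitMax? q.2.1 " " 2 with
          | some [_, jmp_label, _] =>
            (match PySem.Str.splitMax? q.2.2 " " 1 with
             | some [_, target_label] =>
                if jmp_label == target_label then PySem.Set.add s q.1 else s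
             | _ => s)  -- Python raises ValueError here; excluded by Pre_
          | _ => s      -- Python raises ValueError here; excluded by Pre_
      ) PySem.Set.empty
  ((PySem.List.enumerate lines 0).filter
      (fun q => !(PySem.Set.contains remove_lines q.1))).map (·.2)

-- ===== PORT B =====
-- The output stack is carried in reverse (head = Python's out[-1]); append = cons, pop = tail.
-- out[-1].split(' ',2)[1] / line.split(' ',1)[1] are ported with getD: exact here because the
-- startswith guards guarantee the split has at least two parts.
def pvStepB (out : List String) (line : String) : List String :=
  let popped :=
    if PySem.Str.startswith line "label " then
      match out with
      | [] => out
      | prev :: rest =>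
        if PySem.Str.startswith prev "jump " &&
           ((PySem.Str.splitMax? prev " " 2).getD []).getD 1 "" ==
             ((PySem.Str.splitMax? line " " 1).getD []).getD 1 ""
        then rest else out
    else out
  line :: popped

def remove_unnecessary_jumps_alt (lines : List String) : List String :=
  (lines.foldl pvStepB []).reverse

-- ===== PRECONDITION & SPEC =====
-- Pre_ excludes exactly the inputs on which A raises ValueError: a 'jump ' line whose
-- split(' ', 2) does not have 3 parts directly before a 'label ' line.
def Pre_remove_unnecessary_jumps (lines : List String) : Prop :=
  ∀ p ∈ lines.zip (lines.drop 1),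
    PySem.Str.startswith p.1 "jump " = true → PySem.Str.startswith p.2 "label " = true →
    ((PySem.Str.splitMax? p.1 " " 2).getD []).length = 3 ∧
    ((PySem.Str.splitMax? p.2 " " 1).getD []).length = 2
instance (lines : List String) : Decidable (Pre_remove_unnecessary_jumps lines) := by
  unfold Pre_remove_unnecessary_jumps; infer_instance

def pvWitness_remove_unnecessary_jumps : List String :=
  ["jump x always", "label x", "jump y always", "label z", "end"]

def Spec_remove_unnecessary_jumps (lines : List String) (out : List String) : Prop :=
  out = remove_unnecessary_jumps_alt lines
instance (lines : List String) (out : List String) : Decidable (Spec_remove_unnecessary_jumps lines out) := by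
  unfold Spec_remove_unnecessary_jumps; infer_instance

-- ===== CLAIM (what is proved, stated in full; the proofs are below) =====
def Claim_equal_remove_unnecessary_jumps : Prop :=
  ∀ (lines : List String), Dom_remove_unnecessary_jumps lines →
    Pre_remove_unnecessary_jumps lines →
    Spec_remove_unnecessary_jumps lines (remove_unnecessary_jumps lines)

-- ===== LEMMAS AND PROOFS =====

-- A's add-condition for one adjacent pair (a, b), as a single Bool.
def pvCond (a b : String) : Bool :=
  (PySem.Str.startswith a "jump " && PySem.Str.startswith b "label ") &&
  (match PySem.Str.splitMax? a " " 2, PySem.Str.splitMax? b " " 1 with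
   | some [_, j, _], some [_, t] => j == t
   | _, _ => false)

-- The common look-ahead form both ports are reduced to.
def pvGo : List String → List String
  | [] => []
  | x :: xs =>
    if (match xs with | [] => false | y :: _ => pvCond x y) = true
    then pvGo xs else x :: pvGo xs

theorem pv_getBang (l : List String) (n : Nat) (h : n < l.length) : l[n]! = l[n] := by
  simp [List.getElem!_eq_getElem?_getD, List.getElem?_eq_getElem h]

-- A's fold step adds exactly the index of a pair satisfying pvCond.
theorem pv_mem_step (s : PySem.Set Int) (q : Int × (String × String)) (i : Int) :
    i ∈ (if !(PySem.Str.startswith q.2.1 "jump " && PySem.Str.startswith q.2.2 "label ") then s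
        else
          match PySem.Str.splitMax? q.2.1 " " 2 with
          | some [_, jmp_label, _] =>
            (match PySem.Str.splitMax? q.2.2 " " 1 with
             | some [_, target_label] =>
                if jmp_label == target_label then PySem.Set.add s q.1 else s
             | _ => s)
          | _ => s) ↔ i ∈ s ∨ (pvCond q.2.1 q.2.2 = true ∧ i = q.1) := by
  unfold pvCond
  cases hpre : (PySem.Str.startswith q.2.1 "jump " && PySem.Str.startswith q.2.2 "label ") with
  | false =>
    simp
  | true =>
    simp only [Bool.not_true, Bool.false_eq_true, if_false, Bool.true_and]
    cases hA : PySem.Str.splitMax? q.2.1 " " 2 with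
    | none => simp
    | some l =>
      match l with
      | [] => simp
      | [a] => simp
      | [a, b] => simp
      | a :: b :: c :: d :: r => simp
      | [a, b, c] =>
        cases hB : PySem.Str.splitMax? q.2.2 " " 1 with
        | none => simp
        | some m =>
          match m with
          | [] => simp
          | [u] => simp
          | u :: v :: w :: r => simp
          | [u, v] =>
            by_cases hbv : (b == v) = true
            · simp only [hbv, if_pos]
              simp [PySem.Set.mem_add]
            · simp only [Bool.not_eq_true] at hbv
              simp [hbv]

theorem pv_mem_fold (pairs : List (String × String)) (k : Int) (s : PySem.Set Int) (i : Int) :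
    i ∈ (PySem.List.enumerate pairs k).foldl
      (fun s q =>
        if !(PySem.Str.startswith q.2.1 "jump " && PySem.Str.startswith q.2.2 "label ") then s
        else
          match PySem.Str.splitMax? q.2.1 " " 2 with
          | some [_, jmp_label, _] =>
            (match PySem.Str.splitMax? q.2.2 " " 1 with
             | some [_, target_label] =>
                if jmp_label == target_label then PySem.Set.add s q.1 else s
             | _ => s)
          | _ => s) s
    ↔ i ∈ s ∨ ∃ (n : Nat), ∃ (_h : n < pairs.length),
        i = k + n ∧ pvCond pairs[n].1 pairs[n].2 = true := by
  induction pairs generalizing k s with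
  | nil => simp [PySem.List.enumerate]
  | cons p ps ih =>
    rw [PySem.List.enumerate_cons, List.foldl_cons, ih, pv_mem_step]
    constructor
    · rintro (⟨h | ⟨hc, hi⟩⟩ | ⟨n, hn, hi, hc⟩)
      · exact Or.inl h
      · exact Or.inr ⟨0, by simp, by simpa using hi, by simpa using hc⟩
      · exact Or.inr ⟨n + 1, by simpa using hn, by push_cast at hi ⊢; omega, by simpa using hc⟩
    · rintro (h | ⟨n, hn, hi, hc⟩)
      · exact Or.inl (Or.inl h)
      · cases n with
        | zero => exact Or.inl (Or.inr ⟨by simpa using hc, by simpa using hi⟩)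
        | succ m =>
          exact Or.inr ⟨m, by simpa using hn, by push_cast at hi ⊢; omega, by simpa using hc⟩

-- Filtering by membership of the built index set is the look-ahead form.
theorem pv_filter_eq_go (lines : List String) (S : PySem.Set Int) (k : Int)
    (hS : ∀ n : Nat,
      ((k + n) ∈ S ↔ (n + 1 < lines.length ∧ pvCond lines[n]! lines[n+1]! = true))) :
    ((PySem.List.enumerate lines k).filter
      (fun q => !(PySem.Set.contains S q.1))).map (·.2) = pvGo lines := by
  induction lines generalizing k with
  | nil => simp [PySem.List.enumerate, pvGo]
  | cons x xs ih =>
    rw [PySem.List.enumerate_cons, List.filter_cons]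
    have ihh : ((PySem.List.enumerate xs (k+1)).filter
        (fun q => !(PySem.Set.contains S q.1))).map (·.2) = pvGo xs := by
      apply ih
      intro n
      have := hS (n + 1)
      have e1 : k + ((n : Int) + 1) = (k + 1) + n := by ring
      push_cast at this
      rw [e1] at this
      rw [this]
      simp
    cases xs with
    | nil =>
      have h0 : ¬ (k ∈ S) := by
        have := hS 0
        simp only [Nat.cast_zero, add_zero] at this
        rw [this]
        simp
      have hcont : (PySem.Set.contains S k) = false := by
        simp only [PySem.Set.contains]
        rw [Bool.eq_false_iff]
        intro hc
        exact h0 (List.contains_iff_mem.mp hc)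
      rw [hcont]
      simp [PySem.List.enumerate, pvGo]
    | cons y ys =>
      have h0 : k ∈ S ↔ pvCond x y = true := by
        have := hS 0
        simp only [Nat.cast_zero, add_zero] at this
        rw [this]
        simp
      have hcont : (PySem.Set.contains S k) = pvCond x y := by
        rw [Bool.eq_iff_iff]
        simpa only [PySem.Set.contains, List.contains_iff_mem] using h0
      rw [hcont]
      cases hm : pvCond x y with
      | true =>
        rw [if_neg (by simp)]
        rw [ihh]
        simp [pvGo, hm]
      | false =>
        rw [if_pos (show (!false) = true from rfl), List.map_cons, ihh]
        simp [pvGo, hm]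

theorem pv_a_eq_go (lines : List String) : remove_unnecessary_jumps lines = pvGo lines := by
  unfold remove_unnecessary_jumps
  rw [PySem.List.slice_from lines (by norm_num)]
  simp only [Int.toNat_one]
  apply pv_filter_eq_go
  intro n
  rw [pv_mem_fold]
  have hlen : (lines.zip (lines.drop 1)).length = lines.length - 1 := by
    simp [List.length_zip]
  have hget : ∀ (m : Nat) (hm : m < (lines.zip (lines.drop 1)).length),
      (lines.zip (lines.drop 1))[m].1 = lines[m]! ∧
      (lines.zip (lines.drop 1))[m].2 = lines[m+1]! := by
    intro m hm
    have hm1 : m < lines.length := by omega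
    have hm2 : m + 1 < lines.length := by omega
    constructor
    · rw [List.getElem_zip]
      rw [pv_getBang _ _ hm1]
    · rw [List.getElem_zip]
      rw [pv_getBang _ _ hm2]
      simp only
      rw [List.getElem_drop]
      congr 1
      omega
  constructor
  · rintro (h | ⟨m, hm, hi, hc⟩)
    · simp [PySem.Set.empty] at h
    · have hnm : n = m := by have := hi; omega
      subst hnm
      refine ⟨by omega, ?_⟩
      obtain ⟨e1, e2⟩ := hget n hm
      rwa [e1, e2] at hc
  · rintro ⟨h1, hc⟩
    right
    have hlt : n < (lines.zip (lines.drop 1)).length := by omega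
    obtain ⟨e1, e2⟩ := hget n hlt
    exact ⟨n, hlt, rfl, by rw [e1, e2]; exact hc⟩

-- Pre_ descends to the tail.
theorem pv_pre_tail (x : String) (xs : List String)
    (hP : Pre_remove_unnecessary_jumps (x :: xs)) : Pre_remove_unnecessary_jumps xs := by
  intro p hp
  apply hP
  cases xs with
  | nil => simp at hp
  | cons y ys =>
    simp only [List.drop_succ_cons, List.drop_zero] at hp ⊢
    rw [List.zip_cons_cons]
    exact List.mem_cons_of_mem _ hp

-- Under Pre_'s pair condition, one B step on a nonempty stack is decided by pvCond.
theorem pv_stepB_eq (prev line : String) (acc : List String)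
    (h : PySem.Str.startswith prev "jump " = true → PySem.Str.startswith line "label " = true →
      ((PySem.Str.splitMax? prev " " 2).getD []).length = 3 ∧
      ((PySem.Str.splitMax? line " " 1).getD []).length = 2) :
    pvStepB (prev :: acc) line =
      if pvCond prev line then line :: acc else line :: prev :: acc := by
  unfold pvStepB pvCond
  cases hl : PySem.Str.startswith line "label " with
  | false => simp
  | true =>
    cases hj : PySem.Str.startswith prev "jump " with
    | false => simp at hj; simp [hj]
    | true =>
      obtain ⟨h1, h2⟩ := h hj hl
      cases hA : PySem.Str.splitMax? prev " " 2 with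
      | none => rw [hA] at h1; simp at h1
      | some l =>
        rw [hA] at h1
        simp only [Option.getD_some] at h1
        match l, h1 with
        | [a, b, c], _ =>
          cases hB : PySem.Str.splitMax? line " " 1 with
          | none => rw [hB] at h2; simp at h2
          | some m =>
            rw [hB] at h2
            simp only [Option.getD_some] at h2
            match m, h2 with
            | [u, v], _ =>
              simp at hj
              by_cases hbv : (b == v) = true
              · simp [hA, hj, hbv]
              · simp only [Bool.not_eq_true] at hbv
                simp [hA, hj, hbv]

-- B's fold, started with the previous line on the stack, produces the look-ahead form.
theorem pv_fold_alt (rest : List String) (prev : String) (acc : List String)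
    (hP : Pre_remove_unnecessary_jumps (prev :: rest)) :
    rest.foldl pvStepB (prev :: acc) = (pvGo (prev :: rest)).reverse ++ acc := by
  induction rest generalizing prev acc with
  | nil => simp [pvGo]
  | cons y t ih =>
    have hpair := hP (prev, y) (by simp)
    rw [List.foldl_cons, pv_stepB_eq prev y acc hpair]
    have hPt : Pre_remove_unnecessary_jumps (y :: t) := pv_pre_tail prev (y :: t) hP
    cases hm : pvCond prev y with
    | true =>
      rw [if_pos rfl, ih y acc hPt]
      simp [pvGo, hm]
    | false =>
      rw [if_neg (by simp), ih y (prev :: acc) hPt]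
      simp [pvGo, hm]

theorem pv_alt_eq_go (lines : List String) (hP : Pre_remove_unnecessary_jumps lines) :
    remove_unnecessary_jumps_alt lines = pvGo lines := by
  unfold remove_unnecessary_jumps_alt
  cases lines with
  | nil => rfl
  | cons x xs =>
    have hstep : pvStepB [] x = [x] := by
      unfold pvStepB
      cases h : PySem.Str.startswith x "label " <;> simp
    rw [List.foldl_cons, hstep, pv_fold_alt xs x [] hP]
    simp

-- ===== VERDICT (by name: the statement is the Claim_ definition above) =====
theorem remove_unnecessary_jumps_spec : Claim_equal_remove_unnecessary_jumps := by
  intro lines _ hP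
  unfold Spec_remove_unnecessary_jumps
  rw [pv_a_eq_go lines, pv_alt_eq_go lines hP]
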